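-- pv_equiv track=rewrite | github.com/bitterlucky/cs61a | disc/disc03.py | has_seven
-- ===== SOURCE A (Python) =====
-- def has_seven(n):
--     if n % 7 == 0:
--         return True
--     elif n % 10 == 7:
--         return True
--     elif n < 10:
--         return False
--     else:
--         return has_seven(n // 10)
-- ===== SOURCE B (Python) =====
-- def has_seven(n):
--     # Build the list of successive //10 truncations first, then test them all.
--     ts = [n]
--     t = n
--     while t >= 10:
--         t //= 10
--         ts.append(t)
--     return any(t % 7 == 0 or t % 10 == 7 for t in ts)
-- ===== Notes on version B (the rewrite author's own statement) =====
-- stated objective: alternative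
-- what changed: B first materialises the whole list of successive floor-division-by-10 truncations with an iterative loop and then tests them all with any(), instead of A's early-returning recursion that interleaves the tests with the truncation.
import Mathlib
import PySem

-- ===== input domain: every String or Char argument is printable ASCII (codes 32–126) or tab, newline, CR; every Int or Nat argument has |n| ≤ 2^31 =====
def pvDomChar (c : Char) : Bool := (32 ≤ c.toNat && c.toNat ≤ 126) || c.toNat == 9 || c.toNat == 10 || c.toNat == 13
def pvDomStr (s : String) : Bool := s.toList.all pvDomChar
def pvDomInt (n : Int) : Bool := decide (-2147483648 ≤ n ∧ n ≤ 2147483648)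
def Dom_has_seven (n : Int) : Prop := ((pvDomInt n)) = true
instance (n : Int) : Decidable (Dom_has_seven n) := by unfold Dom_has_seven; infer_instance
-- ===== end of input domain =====

-- B replaces A's early-returning recursion by a loop that first builds the list of
-- //10 truncations and then tests them all with any(); return values agree everywhere.

-- ===== PORT A =====
def has_seven (n : Int) : Bool :=
  if PySem.Int.mod n 7 == 0 then true
  else if PySem.Int.mod n 10 == 7 then true
  else if n < 10 then false
  else has_seven (PySem.Int.floordiv n 10)
termination_by n.toNat
decreasing_by
  rename_i h1 h2 h3
  have h10 : (10:Int) ≤ n := by omega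
  rw [PySem.Int.floordiv_eq_ediv_of_pos (by omega : (0:Int) < 10)]
  omega

-- ===== PORT B =====
-- the `while t >= 10` loop of Source B, producing ts (list of truncations, head first)
def hasSevenTruncs (t : Int) : List Int :=
  if h : t ≥ 10 then t :: hasSevenTruncs (PySem.Int.floordiv t 10)
  else [t]
termination_by t.toNat
decreasing_by
  rw [PySem.Int.floordiv_eq_ediv_of_pos (by omega : (0:Int) < 10)]
  omega

def has_seven_alt (n : Int) : Bool :=
  (hasSevenTruncs n).any (fun t => PySem.Int.mod t 7 == 0 || PySem.Int.mod t 10 == 7)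

-- ===== PRECONDITION & SPEC =====
def Spec_has_seven (n : Int) (out : Bool) : Prop := out = has_seven_alt n
instance (n : Int) (out : Bool) : Decidable (Spec_has_seven n out) := by unfold Spec_has_seven; infer_instance

-- ===== CLAIM (what is proved, stated in full; the proofs are below) =====
def Claim_equal_has_seven : Prop := ∀ (n : Int), Dom_has_seven n → Spec_has_seven n (has_seven n)

-- ===== LEMMAS AND PROOFS =====
theorem truncs_any (p : Int → Bool) (n : Int) :
    (hasSevenTruncs n).any p
      = (p n || (if n ≥ 10 then (hasSevenTruncs (PySem.Int.floordiv n 10)).any p else false)) := by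
  rw [hasSevenTruncs]; split <;> simp_all

theorem has_seven_eq_alt (n : Int) : has_seven n = has_seven_alt n := by
  unfold has_seven_alt
  induction n using has_seven.induct with
  | case1 n h =>
      rw [has_seven, truncs_any]; simp_all
  | case2 n h1 h2 =>
      rw [has_seven, truncs_any]; simp_all
  | case3 n h1 h2 h3 =>
      rw [has_seven, truncs_any]
      have : ¬ n ≥ 10 := by omega
      simp_all
  | case4 n h1 h2 h3 ih =>
      have hge : n ≥ 10 := by omega
      have h1' : (PySem.Int.mod n 7 == 0) = false := by simpa using h1
      have h2' : (PySem.Int.mod n 10 == 7) = false := by simpa using h2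
      rw [has_seven, truncs_any, if_pos hge]
      unfold has_seven_alt at ih
      rw [h1', h2', if_neg h3]
      simpa using ih

-- ===== VERDICT (by name: the statement is the Claim_ definition above) =====
theorem has_seven_spec : Claim_equal_has_seven := by
  intro n _; exact has_seven_eq_alt n
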